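-- pv_equiv track=rewrite | github.com/nota-github/nota_ai_pascal_moe_quantization | src/stage1/step6_apply_bracket.py | merged_spans
-- ===== SOURCE A (Python) =====
-- def merged_spans(
--     labels: list[str | None],
--     offsets: list[tuple[int, int]],
-- ) -> list[tuple[int, int, str]]:
--     spans: list[tuple[int, int, str]] = []
--     i = 0
--     n = len(labels)
--     while i < n:
--         if labels[i] is None:
--             i += 1
--             continue
--         lab = labels[i]
--         j = i + 1
--         while j < n and labels[j] == lab:
--             j += 1
--         start_ch = offsets[i][0]
--         end_ch = offsets[j - 1][1]
--         spans.append((start_ch, end_ch, lab))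
--         i = j
--     return spans
-- ===== SOURCE B (Python) =====
-- def merged_spans(
--     labels: list[str | None],
--     offsets: list[tuple[int, int]],
-- ) -> list[tuple[int, int, str]]:
--     # single pass: fold over (label, offset) pairs keeping the pending run
--     spans: list[tuple[int, int, str]] = []
--     cur = None  # pending run as (start, end, label), label may be None
--     for lab, (s, e) in zip(labels, offsets):
--         if cur is not None and lab == cur[2]:
--             cur = (cur[0], e, cur[2])
--         else:
--             if cur is not None and cur[2] is not None:
--                 spans.append(cur)
--             cur = (s, e, lab)
--     if cur is not None and cur[2] is not None:
--         spans.append(cur)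
--     return spans
-- ===== Notes on version B (the rewrite author's own statement) =====
-- stated objective: alternative
-- what changed: Replaced the nested two-pointer index scan (outer i, inner j over labels with offsets indexed) by a single element-wise fold over zip(labels, offsets) that keeps one pending run (start, end, label) in an accumulator and flushes it when the label changes.
import Mathlib
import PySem

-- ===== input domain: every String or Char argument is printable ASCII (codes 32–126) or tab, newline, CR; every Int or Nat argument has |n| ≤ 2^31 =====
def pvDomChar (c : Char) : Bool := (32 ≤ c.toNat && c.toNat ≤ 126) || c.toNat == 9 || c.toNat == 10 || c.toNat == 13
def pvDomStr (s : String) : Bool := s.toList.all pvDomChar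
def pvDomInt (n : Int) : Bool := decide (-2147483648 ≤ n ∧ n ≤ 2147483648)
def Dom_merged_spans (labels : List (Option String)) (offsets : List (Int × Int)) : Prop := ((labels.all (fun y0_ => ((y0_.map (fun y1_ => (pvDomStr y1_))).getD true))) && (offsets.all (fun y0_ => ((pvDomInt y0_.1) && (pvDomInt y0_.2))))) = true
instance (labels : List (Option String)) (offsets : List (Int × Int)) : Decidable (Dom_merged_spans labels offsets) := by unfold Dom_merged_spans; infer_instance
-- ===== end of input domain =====

-- B replaces A's nested two-pointer index scan by a single fold carrying a pending run (objective: alternative decomposition, same cost).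

-- ===== PORT A =====
-- inner while loop: advance j while j < n and labels[j] == lab
def scanJA (labels : List (Option String)) (n : Nat) (lab : String) (j : Nat) : Nat :=
  if h : j < n ∧ labels.getD j none = some lab then scanJA labels n lab (j+1) else j
termination_by n - j
decreasing_by omega

theorem scanJA_ge (labels : List (Option String)) (n : Nat) (lab : String) (j : Nat) :
    j ≤ scanJA labels n lab j := by
  fun_induction scanJA <;> omega

-- outer while loop on i; offsets accesses are in range on Pre_, so getD's default is never used there
def aloop (labels : List (Option String)) (offsets : List (Int × Int)) (n : Nat)
    (i : Nat) (spans : List (Int × Int × String)) : List (Int × Int × String) :=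
  if _h : i < n then
    match labels.getD i none with
    | none => aloop labels offsets n (i+1) spans
    | some lab =>
      let j := scanJA labels n lab (i+1)
      let start_ch := (offsets.getD i (0,0)).1
      let end_ch := (offsets.getD (j-1) (0,0)).2
      aloop labels offsets n j (spans ++ [(start_ch, end_ch, lab)])
  else spans
termination_by n - i
decreasing_by
  · omega
  · have hge : i + 1 ≤ scanJA labels n lab (i+1) := scanJA_ge labels n lab (i+1)
    omega

def merged_spans (labels : List (Option String)) (offsets : List (Int × Int)) : List (Int × Int × String) :=
  aloop labels offsets labels.length 0 []

-- ===== PORT B =====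
-- one fold step: extend the pending run or flush it and start a new one
def bstep (st : List (Int × Int × String) × Option (Int × Int × Option String))
    (p : Option String × (Int × Int)) : List (Int × Int × String) × Option (Int × Int × Option String) :=
  match st, p with
  | (spans, some (cs, ce, clab)), (lab, (s, e)) =>
    if lab = clab then (spans, some (cs, e, clab))
    else
      match clab with
      | some c => (spans ++ [(cs, ce, c)], some (s, e, lab))
      | none => (spans, some (s, e, lab))
  | (spans, none), (lab, (s, e)) => (spans, some (s, e, lab))

-- final flush of the pending run
def bflush (st : List (Int × Int × String) × Option (Int × Int × Option String)) : List (Int × Int × String) :=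
  match st with
  | (spans, some (cs, ce, some c)) => spans ++ [(cs, ce, c)]
  | (spans, _) => spans

def merged_spans_alt (labels : List (Option String)) (offsets : List (Int × Int)) : List (Int × Int × String) :=
  bflush ((labels.zip offsets).foldl bstep ([], none))

-- ===== PRECONDITION & SPEC =====
-- Pre_ excludes exactly the inputs on which A raises IndexError: a non-None label at an index
-- not covered by offsets makes A read offsets out of range.
def Pre_merged_spans (labels : List (Option String)) (offsets : List (Int × Int)) : Prop :=
  ∀ k, k < labels.length → labels.getD k none ≠ none → k < offsets.length
instance (labels : List (Option String)) (offsets : List (Int × Int)) : Decidable (Pre_merged_spans labels offsets) := by unfold Pre_merged_spans; infer_instance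

def pvWitness_merged_spans : List (Option String) × (List (Int × Int)) :=
  ([some "a", some "a", none, some "b"], [(0,1),(1,2),(2,3),(3,5)])

def Spec_merged_spans (labels : List (Option String)) (offsets : List (Int × Int)) (out : List (Int × Int × String)) : Prop := out = merged_spans_alt labels offsets
instance (labels : List (Option String)) (offsets : List (Int × Int)) (out : List (Int × Int × String)) : Decidable (Spec_merged_spans labels offsets out) := by unfold Spec_merged_spans; infer_instance

-- ===== CLAIM (what is proved, stated in full; the proofs are below) =====
def Claim_equal_merged_spans : Prop := ∀ (labels : List (Option String)) (offsets : List (Int × Int)), Dom_merged_spans labels offsets → Pre_merged_spans labels offsets → Spec_merged_spans labels offsets (merged_spans labels offsets)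

-- ===== LEMMAS AND PROOFS =====

theorem scanJA_stop (labels : List (Option String)) (n : Nat) (lab : String) (j : Nat) :
    ¬ (scanJA labels n lab j < n ∧ labels.getD (scanJA labels n lab j) none = some lab) := by
  fun_induction scanJA with
  | case1 j h ih => exact ih
  | case2 j h => simpa [scanJA, h] using h

theorem zip_drop_cons (labels : List (Option String)) (offsets : List (Int × Int)) (i : Nat)
    (h1 : i < labels.length) (h2 : i < offsets.length) :
    (labels.zip offsets).drop i
      = (labels.getD i none, offsets.getD i (0,0)) :: (labels.zip offsets).drop (i+1) := by
  have hz : i < (labels.zip offsets).length := by simp [List.length_zip]; omega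
  rw [List.drop_eq_getElem_cons hz]
  simp [List.getElem_zip, h1, h2]

theorem zip_drop_nil (labels : List (Option String)) (offsets : List (Int × Int)) (i : Nat)
    (h : labels.length ≤ i ∨ offsets.length ≤ i) :
    (labels.zip offsets).drop i = [] := by
  apply List.drop_eq_nil_of_le
  simp [List.length_zip]; omega

-- a pending none-labelled run is interchangeable with any other (it is never emitted)
theorem bflush_none_irr (t : List (Option String × (Int × Int)))
    (spans : List (Int × Int × String)) (a b a' b' : Int) :
    bflush (t.foldl bstep (spans, some (a, b, none)))
      = bflush (t.foldl bstep (spans, some (a', b', none))) := by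
  induction t generalizing a b a' b' with
  | nil => simp [bflush]
  | cons hd tl ih =>
    obtain ⟨lab, s, e⟩ := hd
    by_cases h : lab = none
    · subst h; simp only [List.foldl_cons, bstep]; exact ih _ _ _ _
    · simp [bstep, h]

theorem bflush_none_drop (t : List (Option String × (Int × Int)))
    (spans : List (Int × Int × String)) (a b : Int) :
    bflush (t.foldl bstep (spans, some (a, b, none)))
      = bflush (t.foldl bstep (spans, none)) := by
  cases t with
  | nil => simp [bflush]
  | cons hd tl =>
    obtain ⟨lab, s, e⟩ := hd
    by_cases h : lab = none
    · subst h
      simp only [List.foldl_cons, bstep]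
      exact bflush_none_irr tl spans a e s e
    · simp [bstep, h]

-- consuming a maximal run element-wise extends the pending run to offsets[j-1].2
theorem bflush_run (labels : List (Option String)) (offsets : List (Int × Int))
    (hpre : Pre_merged_spans labels offsets) (lab : String) (k : Nat)
    (spans : List (Int × Int × String)) (s0 : Int) :
    bflush (((labels.zip offsets).drop k).foldl bstep
        (spans, some (s0, (offsets.getD (k-1) (0,0)).2, some lab)))
      = bflush (((labels.zip offsets).drop (scanJA labels labels.length lab k)).foldl bstep
        (spans, some (s0, (offsets.getD (scanJA labels labels.length lab k - 1) (0,0)).2, some lab))) := by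
  fun_induction scanJA labels labels.length lab k with
  | case1 j h ih =>
    have hj2 : j < offsets.length := hpre j h.1 (fun hn => by simp [List.getD] at hn; simp [hn] at h)
    rw [zip_drop_cons labels offsets j h.1 hj2, h.2]
    simp only [List.foldl_cons, bstep]
    simpa using ih
  | case2 j h => rfl

-- when the head no longer matches (or the list ends), the pending run flushes into spans
theorem bflush_emit (t : List (Option String × (Int × Int)))
    (spans : List (Int × Int × String)) (s0 e : Int) (lab : String)
    (h : t = [] ∨ ∃ l' o' rest, t = (l', o') :: rest ∧ l' ≠ some lab) :
    bflush (t.foldl bstep (spans, some (s0, e, some lab)))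
      = bflush (t.foldl bstep (spans ++ [(s0, e, lab)], none)) := by
  rcases h with h | ⟨l', o', rest, rfl, hne⟩
  · subst h; simp [bflush]
  · obtain ⟨s', e'⟩ := o'
    simp [bstep, hne]

theorem aloop_eq (labels : List (Option String)) (offsets : List (Int × Int))
    (hpre : Pre_merged_spans labels offsets) (i : Nat) (spans : List (Int × Int × String)) :
    aloop labels offsets labels.length i spans
      = bflush (((labels.zip offsets).drop i).foldl bstep (spans, none)) := by
  fun_induction aloop labels offsets labels.length i spans with
  | case1 i spans h hnone ih =>
    -- labels[i] is None
    by_cases hio : i < offsets.length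
    · rw [zip_drop_cons labels offsets i h hio, ih, hnone]
      simp only [List.foldl_cons, bstep]
      exact (bflush_none_drop _ _ _ _).symm
    · rw [zip_drop_nil labels offsets i (by omega), ih,
        zip_drop_nil labels offsets (i+1) (by omega)]
  | case2 i spans h lab hlab j start_ch end_ch ih =>
    -- labels[i] = some lab
    have hio : i < offsets.length := hpre i h (fun hn => by simp [List.getD] at hn; simp [hn] at hlab)
    have hj : j = scanJA labels labels.length lab (i+1) := rfl
    have hs : start_ch = (offsets.getD i (0,0)).1 := rfl
    have he : end_ch = (offsets.getD (j-1) (0,0)).2 := rfl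
    clear_value j start_ch end_ch
    subst hs he hj
    rw [zip_drop_cons labels offsets i h hio, hlab]
    simp only [List.foldl_cons, bstep]
    have hrun := bflush_run labels offsets hpre lab (i+1) spans ((offsets.getD i (0,0)).1)
    simp only [Nat.add_sub_cancel] at hrun
    rw [hrun]
    have hstop := scanJA_stop labels labels.length lab (i+1)
    have hemit : ((labels.zip offsets).drop (scanJA labels labels.length lab (i+1))) = [] ∨
        ∃ l' o' rest, ((labels.zip offsets).drop (scanJA labels labels.length lab (i+1))) = (l', o') :: rest ∧ l' ≠ some lab := by
      set s := scanJA labels labels.length lab (i+1) with hsdef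
      rcases Nat.lt_or_ge s ((labels.zip offsets).length) with hlt | hge2
      · have hj1 : s < labels.length := by simp [List.length_zip] at hlt; omega
        have hj2 : s < offsets.length := by simp [List.length_zip] at hlt; omega
        refine Or.inr ⟨labels.getD s none, offsets.getD s (0,0), (labels.zip offsets).drop (s+1),
          zip_drop_cons labels offsets s hj1 hj2, ?_⟩
        intro hcon
        exact hstop ⟨hj1, hcon⟩
      · exact Or.inl (List.drop_eq_nil_of_le hge2)
    rw [bflush_emit _ _ _ _ _ hemit, ih]
  | case3 i spans h =>
    rw [zip_drop_nil labels offsets i (by omega)]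
    simp [bflush]

-- ===== VERDICT (by name: the statement is the Claim_ definition above) =====
theorem merged_spans_spec : Claim_equal_merged_spans := by
  intro labels offsets _ hpre
  unfold Spec_merged_spans merged_spans merged_spans_alt
  simpa using aloop_eq labels offsets hpre 0 []
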